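-- pv_equiv track=rewrite | github.com/RamananVr/Leetcodepython | backtracking_simulation/2056_unknown_title.py | numOfValidMoveCombinations
-- ===== SOURCE A (Python) =====
-- from itertools import product
--
-- def numOfValidMoveCombinations(pieces, positions):
--     def get_moves(piece, r, c):
--         """Generate all possible moves for a given piece from position (r, c)."""
--         moves = set()
--         if piece in ("rook", "queen"):
--             # Horizontal and vertical moves
--             for i in range(1, 9):
--                 if i != r:  # Vertical moves
--                     moves.add((i, c))
--                 if i != c:  # Horizontal moves
--                     moves.add((r, i))
--         if piece in ("bishop", "queen"):
--             # Diagonal moves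
--             for i in range(1, 9):
--                 if i != 0:
--                     if 1 <= r + i <= 8 and 1 <= c + i <= 8:
--                         moves.add((r + i, c + i))
--                     if 1 <= r - i <= 8 and 1 <= c - i <= 8:
--                         moves.add((r - i, c - i))
--                     if 1 <= r + i <= 8 and 1 <= c - i <= 8:
--                         moves.add((r + i, c - i))
--                     if 1 <= r - i <= 8 and 1 <= c + i <= 8:
--                         moves.add((r - i, c + i))
--         return moves
--
--     def is_valid_combination(moves):
--         """Check if a combination of moves is valid (no two pieces occupy the same square)."""
--         return len(set(moves)) == len(moves)
--
--     # Generate all possible moves for each piece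
--     all_moves = []
--     for i, piece in enumerate(pieces):
--         r, c = positions[i]
--         moves = get_moves(piece, r, c)
--         moves.add((r, c))  # Include the option of not moving
--         all_moves.append(list(moves))
--
--     # Generate all combinations of moves
--     valid_combinations = 0
--     for combination in product(*all_moves):
--         if is_valid_combination(combination):
--             valid_combinations += 1
--
--     return valid_combinations
-- ===== SOURCE B (Python) =====
-- def numOfValidMoveCombinations(pieces, positions):
--     def get_moves(piece, r, c):
--         """Generate all possible moves for a given piece from position (r, c)."""
--         moves = set()
--         if piece in ("rook", "queen"):
--             for i in range(1, 9):
--                 if i != r: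
--                     moves.add((i, c))
--                 if i != c:
--                     moves.add((r, i))
--         if piece in ("bishop", "queen"):
--             for i in range(1, 9):
--                 if i != 0:
--                     if 1 <= r + i <= 8 and 1 <= c + i <= 8:
--                         moves.add((r + i, c + i))
--                     if 1 <= r - i <= 8 and 1 <= c - i <= 8:
--                         moves.add((r - i, c - i))
--                     if 1 <= r + i <= 8 and 1 <= c - i <= 8:
--                         moves.add((r + i, c - i))
--                     if 1 <= r - i <= 8 and 1 <= c + i <= 8:
--                         moves.add((r - i, c + i))
--         return moves
--
--     # Same option sets as before (destinations plus the start square), but the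
--     # counting is an incremental pruned depth-first assignment instead of
--     # enumerating the full Cartesian product and filtering at the end.
--     options = [list(get_moves(p, r, c) | {(r, c)}) for p, (r, c) in zip(pieces, positions)]
--
--     def dfs(i, used):
--         if i == len(options):
--             return 1
--         total = 0
--         for sq in options[i]:
--             if sq not in used:
--                 used.add(sq)
--                 total += dfs(i + 1, used)
--                 used.discard(sq)
--         return total
--
--     return dfs(0, set())
-- ===== Notes on version B (the rewrite author's own statement) =====
-- stated objective: faster
-- what changed: Replaces the full Cartesian-product enumeration with end filtering (len(set(combo))==len(combo)) by a pruned depth-first assignment that maintains a mutable 'used' set of occupied squares and abandons a branch as soon as a square repeats.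
import Mathlib
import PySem

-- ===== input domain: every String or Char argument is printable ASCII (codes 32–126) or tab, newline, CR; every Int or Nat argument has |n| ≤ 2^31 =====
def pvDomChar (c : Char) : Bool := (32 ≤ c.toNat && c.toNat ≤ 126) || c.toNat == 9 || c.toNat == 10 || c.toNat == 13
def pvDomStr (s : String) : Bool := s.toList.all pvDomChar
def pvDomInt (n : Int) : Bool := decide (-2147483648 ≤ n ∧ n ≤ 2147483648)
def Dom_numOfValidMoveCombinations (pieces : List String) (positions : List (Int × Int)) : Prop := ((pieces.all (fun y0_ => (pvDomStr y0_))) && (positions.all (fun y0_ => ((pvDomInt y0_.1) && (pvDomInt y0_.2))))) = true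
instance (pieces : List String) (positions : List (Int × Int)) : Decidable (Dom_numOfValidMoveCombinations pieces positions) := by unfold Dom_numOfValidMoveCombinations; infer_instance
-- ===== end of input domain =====

-- B replaces A's full Cartesian-product enumeration + final distinctness filter by a
-- pruned depth-first assignment over the SAME per-piece option sets (objective: faster).

-- ===== PORT A =====
-- get_moves: shared verbatim by A and by B (Source B keeps the helper unchanged).
def pvGetMoves (piece : String) (r c : Int) : PySem.Set (Int × Int) :=
  let moves : PySem.Set (Int × Int) := PySem.Set.empty
  let moves :=
    if piece = "rook" ∨ piece = "queen" then
      (PySem.List.pyRange 1 9 1).foldl (fun m i =>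
        let m := if i ≠ r then PySem.Set.add m (i, c) else m
        if i ≠ c then PySem.Set.add m (r, i) else m) moves
    else moves
  if piece = "bishop" ∨ piece = "queen" then
    (PySem.List.pyRange 1 9 1).foldl (fun m i =>
      if i ≠ 0 then
        let m := if 1 ≤ r + i ∧ r + i ≤ 8 ∧ 1 ≤ c + i ∧ c + i ≤ 8 then PySem.Set.add m (r + i, c + i) else m
        let m := if 1 ≤ r - i ∧ r - i ≤ 8 ∧ 1 ≤ c - i ∧ c - i ≤ 8 then PySem.Set.add m (r - i, c - i) else m
        let m := if 1 ≤ r + i ∧ r + i ≤ 8 ∧ 1 ≤ c - i ∧ c - i ≤ 8 then PySem.Set.add m (r + i, c - i) else m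
        if 1 ≤ r - i ∧ r - i ≤ 8 ∧ 1 ≤ c + i ∧ c + i ≤ 8 then PySem.Set.add m (r - i, c + i) else m
      else m) moves
  else moves

-- itertools.product(*lists), tuples as lists, in product order (first list outermost)
def pvProduct : List (List (Int × Int)) → List (List (Int × Int))
  | [] => [[]]
  | o :: L => o.flatMap (fun x => (pvProduct L).map (fun t => x :: t))

def numOfValidMoveCombinations (pieces : List String) (positions : List (Int × Int)) : Int :=
  let allMoves : List (List (Int × Int)) :=
    (PySem.List.enumerate pieces 0).foldl (fun acc ip =>
      let rc := PySem.List.pyGetD positions ip.1 (0, 0)  -- positions[i]; in range under Pre_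
      acc ++ [(PySem.Set.add (pvGetMoves ip.2 rc.1 rc.2) rc : List (Int × Int))]) []
  (pvProduct allMoves).foldl (fun n combo =>
    if (PySem.Set.ofList combo).length = combo.length then n + 1 else n) 0

-- ===== PORT B =====
-- dfs(i, used): piece by piece, skip squares already used, count completions.
def pvDfs : List (List (Int × Int)) → PySem.Set (Int × Int) → Int
  | [], _ => 1
  | o :: rest, used =>
    o.foldl (fun total sq =>
      if PySem.Set.contains used sq then total
      else total + pvDfs rest (PySem.Set.add used sq)) 0

def numOfValidMoveCombinations_alt (pieces : List String) (positions : List (Int × Int)) : Int :=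
  let options : List (List (Int × Int)) :=
    (pieces.zip positions).map (fun pr =>
      (PySem.Set.union (pvGetMoves pr.1 pr.2.1 pr.2.2) [pr.2] : List (Int × Int)))
  pvDfs options PySem.Set.empty

-- ===== PRECONDITION & SPEC =====
-- Pre_ excludes exactly the inputs where A raises IndexError (positions[i] for some piece index i).
def Pre_numOfValidMoveCombinations (pieces : List String) (positions : List (Int × Int)) : Prop :=
  pieces.length ≤ positions.length
instance (pieces : List String) (positions : List (Int × Int)) : Decidable (Pre_numOfValidMoveCombinations pieces positions) := by unfold Pre_numOfValidMoveCombinations; infer_instance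
def pvWitness_numOfValidMoveCombinations : List String × (List (Int × Int)) := (["rook"], [(1, 1)])

def Spec_numOfValidMoveCombinations (pieces : List String) (positions : List (Int × Int)) (out : Int) : Prop := out = numOfValidMoveCombinations_alt pieces positions
instance (pieces : List String) (positions : List (Int × Int)) (out : Int) : Decidable (Spec_numOfValidMoveCombinations pieces positions out) := by unfold Spec_numOfValidMoveCombinations; infer_instance

-- ===== CLAIM (what is proved, stated in full; the proofs are below) =====
def Claim_equal_numOfValidMoveCombinations : Prop := ∀ (pieces : List String) (positions : List (Int × Int)), Dom_numOfValidMoveCombinations pieces positions → Pre_numOfValidMoveCombinations pieces positions → Spec_numOfValidMoveCombinations pieces positions (numOfValidMoveCombinations pieces positions)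

-- ===== LEMMAS AND PROOFS =====

-- set(t) is a sublist of t (first occurrences kept, in order)
theorem pvOfList_sublist (t : List (Int × Int)) : (PySem.Set.ofList t).Sublist t := by
  induction t using List.reverseRecOn with
  | nil => simp [PySem.Set.ofList_nil]
  | append_singleton xs x ih =>
      rw [PySem.Set.ofList_append_singleton, PySem.Set.add_eq_ite]
      split_ifs
      · exact ih.trans (List.sublist_append_left xs [x])
      · exact List.Sublist.append ih (List.Sublist.refl [x])

-- A's validity test len(set(t)) == len(t) is exactly Nodup
theorem pvValid_iff (t : List (Int × Int)) : (PySem.Set.ofList t).length = t.length ↔ t.Nodup := by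
  constructor
  · intro h
    have := (pvOfList_sublist t).eq_of_length h
    rw [← this]; exact PySem.Set.nodup_ofList t
  · intro h; rw [PySem.Set.ofList_eq_self_of_nodup (xs := t) h]

theorem pvCountP_flatMap (l : List (Int × Int)) (f : Int × Int → List (List (Int × Int)))
    (p : List (Int × Int) → Bool) :
    (l.flatMap f).countP p = (l.map (fun a => (f a).countP p)).sum := by
  induction l with
  | nil => simp
  | cons x xs ih => simp [List.countP_append, ih]

-- the key invariant: dfs over the remaining option lists counts exactly the product
-- tuples that stay disjoint from 'used' and repetition-free
theorem pvDfs_eq_countP (L : List (List (Int × Int))) :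
    ∀ used : List (Int × Int), used.Nodup →
      pvDfs L used = ((pvProduct L).countP (fun t => decide ((used ++ t).Nodup)) : Nat) := by
  induction L with
  | nil =>
      intro used hu
      simp [pvDfs, pvProduct, hu]
  | cons o rest ih =>
      intro used hu
      have hstep : ∀ (total : Int) (sq : Int × Int),
          (if PySem.Set.contains used sq then total
           else total + pvDfs rest (PySem.Set.add used sq))
          = total + (if sq ∈ used then 0 else pvDfs rest (PySem.Set.add used sq)) := by
        intro total sq
        by_cases h : sq ∈ used <;> simp [h]
      have hpoint : ∀ sq : Int × Int,
          (if sq ∈ used then 0 else pvDfs rest (PySem.Set.add used sq))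
          = (((pvProduct rest).countP
                (fun t => decide ((used ++ sq :: t).Nodup)) : Nat) : Int) := by
        intro sq
        by_cases h : sq ∈ used
        · have hz : (pvProduct rest).countP (fun t => decide ((used ++ sq :: t).Nodup)) = 0 := by
            rw [List.countP_eq_zero]
            intro t _
            simp only [decide_eq_true_eq]
            intro hnd
            have := List.disjoint_of_nodup_append hnd
            exact this h (by simp)
          simp [h, hz]
        · have hadd : PySem.Set.add used sq = used ++ [sq] := PySem.Set.add_of_not_mem h
          have hnd : (used ++ [sq]).Nodup := by
            simp only [List.nodup_append, List.nodup_cons, List.not_mem_nil, not_false_iff,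
              List.nodup_nil, and_true, true_and]
            refine ⟨hu, ?_⟩
            intro a hm b hb
            simp at hb
            subst hb
            intro he; exact h (he ▸ hm)
          have := ih (used ++ [sq]) hnd
          rw [hadd]
          simp only [h, if_false, this]
          congr 1
          apply List.countP_congr
          intro t _
          simp [List.append_assoc]
      calc pvDfs (o :: rest) used
          = o.foldl (fun total sq =>
              total + (if sq ∈ used then 0 else pvDfs rest (PySem.Set.add used sq))) 0 := by
            apply PySem.List.foldl_congr_mem
            intro acc x _
            exact hstep acc x
        _ = 0 + (o.map (fun sq => if sq ∈ used then 0 else pvDfs rest (PySem.Set.add used sq))).sum :=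
            PySem.List.foldl_add _ _ _
        _ = ((pvProduct (o :: rest)).countP (fun t => decide ((used ++ t).Nodup)) : Nat) := by
            rw [show pvProduct (o :: rest) = o.flatMap (fun x => (pvProduct rest).map (fun t => x :: t)) from rfl]
            rw [pvCountP_flatMap]
            rw [Nat.cast_list_sum, List.map_map]
            rw [zero_add]
            congr 1
            apply List.map_congr_left
            intro x _
            simp only [Function.comp, List.countP_map]
            rw [hpoint x]
            rfl

-- A's index-based option-list build equals B's zip-based build (indices in range under Pre_)
theorem pvBuild_eq (ps : List String) (qs : List (Int × Int)) :
    ∀ (k : Nat), k + ps.length ≤ qs.length → ∀ acc : List (List (Int × Int)),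
      (PySem.List.enumerate ps (k : Int)).foldl (fun acc ip =>
          let rc := PySem.List.pyGetD qs ip.1 (0, 0)
          acc ++ [(PySem.Set.add (pvGetMoves ip.2 rc.1 rc.2) rc : List (Int × Int))]) acc
      = acc ++ (ps.zip (qs.drop k)).map
          (fun pr => (PySem.Set.union (pvGetMoves pr.1 pr.2.1 pr.2.2) [pr.2] : List (Int × Int))) := by
  induction ps with
  | nil => intro k _ acc; simp [PySem.List.enumerate_nil]
  | cons p ps ih =>
      intro k hk acc
      have hlt : k < qs.length := by simp at hk; omega
      rw [PySem.List.enumerate_cons]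
      rw [List.drop_eq_getElem_cons hlt]
      simp only [List.zip_cons_cons, List.map_cons, List.foldl_cons]
      have hget : PySem.List.pyGetD qs (k : Int) (0, 0) = qs[k] := by
        rw [PySem.List.pyGetD_natCast]
        exact List.getD_eq_getElem qs (0,0) hlt
      have hcast : ((k : Int) + 1) = ((k + 1 : Nat) : Int) := by push_cast; ring
      rw [hcast]
      rw [ih (k + 1) (by simp at hk ⊢; omega) _]
      simp only [hget, List.append_assoc, List.singleton_append]
      rfl

-- ===== VERDICT (by name: the statement is the Claim_ definition above) =====
theorem numOfValidMoveCombinations_spec : Claim_equal_numOfValidMoveCombinations := by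
  intro pieces positions _ hpre
  unfold Spec_numOfValidMoveCombinations numOfValidMoveCombinations numOfValidMoveCombinations_alt
  have hbuild := pvBuild_eq pieces positions 0 (by simpa using hpre) []
  simp only [Nat.cast_zero] at hbuild
  rw [hbuild]
  simp only [List.nil_append, List.drop_zero]
  set opts := (pieces.zip positions).map
      (fun pr => (PySem.Set.union (pvGetMoves pr.1 pr.2.1 pr.2.2) [pr.2] : List (Int × Int))) with hopts
  rw [PySem.List.foldl_ite_add_one]
  rw [show (PySem.Set.empty : PySem.Set (Int × Int)) = ([] : List (Int × Int)) from rfl,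
    pvDfs_eq_countP opts [] List.nodup_nil]
  rw [zero_add]
  congr 1
  apply List.countP_congr
  intro t _
  simp [pvValid_iff]
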